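-- pv_equiv track=rewrite | github.com/pkanduri1/cm3-batch-automations | src/commands/run_tests_command.py | _compute_overall_status
-- ===== SOURCE A (Python) =====
-- from typing import Any
--
-- def _compute_overall_status(results: list[dict[str, Any]]) -> str:
--     """Derive PASS / PARTIAL / FAIL from a list of per-test result dicts."""
--     statuses = {r["status"] for r in results}
--     error_statuses = {"FAIL", "ERROR"}
--     pass_statuses = {"PASS", "SKIPPED"}
--
--     if statuses <= pass_statuses:
--         overall = "PASS"
--     elif statuses & error_statuses and not (statuses - error_statuses - pass_statuses):
--         overall = "PARTIAL" if statuses & pass_statuses else "FAIL"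
--     else:
--         overall = "PARTIAL"
--
--     if not (statuses & pass_statuses):
--         overall = "FAIL"
--     return overall
-- ===== SOURCE B (Python) =====
-- def _compute_overall_status(results):
--     """Derive PASS / PARTIAL / FAIL from a list of per-test result dicts."""
--     statuses = [r["status"] for r in results]
--     pass_statuses = {"PASS", "SKIPPED"}
--     has_pass = any(s in pass_statuses for s in statuses)
--     all_pass = all(s in pass_statuses for s in statuses)
--     if not has_pass:
--         return "FAIL"
--     if not all_pass:
--         return "PARTIAL"
--     return "PASS"
-- ===== Notes on version B (the rewrite author's own statement) =====
-- stated objective: simpler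
-- what changed: Replaces A's set algebra (subset/intersection/difference over a status set plus a final FAIL override) with a flat three-way classification from any/all over the materialized status list.
import Mathlib
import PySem

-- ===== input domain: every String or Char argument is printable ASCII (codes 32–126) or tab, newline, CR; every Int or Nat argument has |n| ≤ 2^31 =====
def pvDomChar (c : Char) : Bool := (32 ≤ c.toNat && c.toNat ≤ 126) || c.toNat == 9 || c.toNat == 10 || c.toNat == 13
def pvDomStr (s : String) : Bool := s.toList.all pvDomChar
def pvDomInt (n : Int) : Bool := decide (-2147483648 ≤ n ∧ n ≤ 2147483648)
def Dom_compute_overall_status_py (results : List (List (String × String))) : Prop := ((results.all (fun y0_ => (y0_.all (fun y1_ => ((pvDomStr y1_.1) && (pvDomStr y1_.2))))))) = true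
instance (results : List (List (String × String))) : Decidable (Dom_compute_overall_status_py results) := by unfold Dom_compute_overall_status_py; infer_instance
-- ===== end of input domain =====

-- B replaces A's set algebra (subset / intersection / difference and a final override)
-- with a flat any/all classification over the status list; objective: simpler, same cost.

-- ===== PORT A =====
-- r["status"] is ported as Dict.getD with a dummy default; Pre_ guarantees the key is present (Python raises KeyError otherwise).
def compute_overall_status_py (results : List (List (String × String))) : String :=
  let statuses : PySem.Set String :=
    PySem.Set.ofList (results.map (fun r => PySem.Dict.getD (PySem.Dict.mk r) "status" ""))
  let error_statuses : PySem.Set String := PySem.Set.ofList ["FAIL", "ERROR"]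
  let pass_statuses : PySem.Set String := PySem.Set.ofList ["PASS", "SKIPPED"]
  let overall : String :=
    if PySem.Set.issubset statuses pass_statuses then "PASS"
    else if (PySem.Set.inter statuses error_statuses ≠ [] ∧
             PySem.Set.diff (PySem.Set.diff statuses error_statuses) pass_statuses = []) then
      (if PySem.Set.inter statuses pass_statuses ≠ [] then "PARTIAL" else "FAIL")
    else "PARTIAL"
  if PySem.Set.inter statuses pass_statuses = [] then "FAIL" else overall

-- ===== PORT B =====
def compute_overall_status_py_alt (results : List (List (String × String))) : String :=
  let statuses : List String := results.map (fun r => PySem.Dict.getD (PySem.Dict.mk r) "status" "")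
  let isPass : String → Bool := fun s => s == "PASS" || s == "SKIPPED"
  let has_pass : Bool := statuses.any isPass
  let all_pass : Bool := statuses.all isPass
  if !has_pass then "FAIL"
  else if !all_pass then "PARTIAL"
  else "PASS"

-- ===== PRECONDITION & SPEC =====
-- Pre_ excludes exactly the inputs where some per-test dict lacks the "status" key: Python A raises KeyError there.
def Pre_compute_overall_status_py (results : List (List (String × String))) : Prop :=
  ∀ r ∈ results, (PySem.Dict.get? (PySem.Dict.mk r) "status").isSome = true
instance (results : List (List (String × String))) : Decidable (Pre_compute_overall_status_py results) := by unfold Pre_compute_overall_status_py; infer_instance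
def pvWitness_compute_overall_status_py : (List (List (String × String))) :=
  [[("status", "PASS")], [("status", "FAIL")]]

def Spec_compute_overall_status_py (results : List (List (String × String))) (out : String) : Prop := out = compute_overall_status_py_alt results
instance (results : List (List (String × String))) (out : String) : Decidable (Spec_compute_overall_status_py results out) := by unfold Spec_compute_overall_status_py; infer_instance

-- ===== CLAIM (what is proved, stated in full; the proofs are below) =====
def Claim_equal_compute_overall_status_py : Prop := ∀ (results : List (List (String × String))), Dom_compute_overall_status_py results → Pre_compute_overall_status_py results → Spec_compute_overall_status_py results (compute_overall_status_py results)

-- ===== LEMMAS AND PROOFS =====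

-- the core fact, about an arbitrary status list L (the ports agree even without Pre_)
theorem core_eq (L : List String) :
    (let statuses : PySem.Set String := PySem.Set.ofList L
     let error_statuses : PySem.Set String := PySem.Set.ofList ["FAIL", "ERROR"]
     let pass_statuses : PySem.Set String := PySem.Set.ofList ["PASS", "SKIPPED"]
     let overall : String :=
       if PySem.Set.issubset statuses pass_statuses then "PASS"
       else if (PySem.Set.inter statuses error_statuses ≠ [] ∧
                PySem.Set.diff (PySem.Set.diff statuses error_statuses) pass_statuses = []) then
         (if PySem.Set.inter statuses pass_statuses ≠ [] then "PARTIAL" else "FAIL")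
       else "PARTIAL"
     if PySem.Set.inter statuses pass_statuses = [] then "FAIL" else overall) =
    (let isPass : String → Bool := fun s => s == "PASS" || s == "SKIPPED"
     if !(L.any isPass) then "FAIL"
     else if !(L.all isPass) then "PARTIAL"
     else "PASS") := by
  simp only []
  have hmemP : ∀ x : String, x ∈ (PySem.Set.ofList ["PASS", "SKIPPED"] : PySem.Set String) ↔
      (x == "PASS" || x == "SKIPPED") = true := by
    intro x
    simp [PySem.Set.mem_ofList]
  have hany : (PySem.Set.inter (PySem.Set.ofList L) (PySem.Set.ofList ["PASS", "SKIPPED"]) = []) ↔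
      (L.any (fun s => s == "PASS" || s == "SKIPPED")) = false := by
    rw [List.eq_nil_iff_forall_not_mem]
    simp only [PySem.Set.mem_inter, PySem.Set.mem_ofList]
    rw [← Bool.not_eq_true, List.any_eq_true]
    constructor
    · intro h ⟨x, hx, hp⟩
      exact h x ⟨hx, by simpa using hp⟩
    · intro h x ⟨hx, hp⟩
      exact h ⟨x, hx, by simpa using hp⟩
  by_cases hp : (L.any (fun s => s == "PASS" || s == "SKIPPED")) = true
  · -- some pass status present
    have hne : ¬ (PySem.Set.inter (PySem.Set.ofList L) (PySem.Set.ofList ["PASS", "SKIPPED"]) = []) := by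
      intro h; rw [hany] at h; simp [h] at hp
    rw [if_neg hne]
    by_cases hall : (L.all (fun s => s == "PASS" || s == "SKIPPED")) = true
    · have hsub : PySem.Set.issubset (PySem.Set.ofList L) (PySem.Set.ofList ["PASS", "SKIPPED"]) = true := by
        rw [PySem.Set.issubset_iff]
        intro x hx
        rw [PySem.Set.mem_ofList] at hx ⊢
        have := List.all_eq_true.mp hall x hx
        simpa using this
      simp [hsub, hp, hall]
    · have hsub : ¬ PySem.Set.issubset (PySem.Set.ofList L) (PySem.Set.ofList ["PASS", "SKIPPED"]) = true := by
        rw [PySem.Set.issubset_iff]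
        intro h
        apply hall
        rw [List.all_eq_true]
        intro x hx
        have := h x (by rw [PySem.Set.mem_ofList]; exact hx)
        rw [PySem.Set.mem_ofList] at this
        simpa using this
      rw [if_neg hsub]
      simp only [hp, hall, Bool.not_true, Bool.not_false, if_false, if_true,
        Bool.false_eq_true]
      split <;> rfl
  · -- no pass status: both FAIL
    have heq : PySem.Set.inter (PySem.Set.ofList L) (PySem.Set.ofList ["PASS", "SKIPPED"]) = [] :=
      hany.mpr (by simpa using hp)
    rw [if_pos heq]
    have h0 : (L.any fun s => s == "PASS" || s == "SKIPPED") = false := by simpa using hp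
    simp [h0]

-- ===== VERDICT (by name: the statement is the Claim_ definition above) =====
theorem compute_overall_status_py_spec : Claim_equal_compute_overall_status_py := by
  intro results _ _
  unfold Spec_compute_overall_status_py compute_overall_status_py compute_overall_status_py_alt
  exact core_eq (results.map (fun r => PySem.Dict.getD (PySem.Dict.mk r) "status" ""))
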